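-- pv_equiv track=rewrite | github.com/HumanCompatibleAI/eirli | src/il_representations/scripts/data/shard_dataset.py | trajectory_iter
-- ===== SOURCE A (Python) =====
-- from typing import Iterator, List, Optional, Tuple
--
-- def trajectory_iter(frame_iter: Iterator[dict]) -> Iterator[List[dict]]:
--     traj: List[dict] = []
--     for frame in frame_iter:
--         traj.append(frame)
--         if frame['dones']:
--             yield traj
--             traj = []
--     if traj:
--         yield traj
-- ===== SOURCE B (Python) =====
-- def trajectory_iter(frame_iter):
--     # build the groups back-to-front: walk the frames in reverse, prepending
--     groups = []
--     for frame in reversed(list(frame_iter)):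
--         if frame['dones']:
--             groups.insert(0, [frame])
--         elif groups:
--             groups[0] = [frame] + groups[0]
--         else:
--             groups = [[frame]]
--     yield from groups
-- ===== Notes on version B (the rewrite author's own statement) =====
-- stated objective: alternative
-- what changed: Replaces the streaming append-and-flush loop with a single reverse traversal that builds the list of trajectories back-to-front by prepending each frame to (or in front of) the first group.
import Mathlib
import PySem

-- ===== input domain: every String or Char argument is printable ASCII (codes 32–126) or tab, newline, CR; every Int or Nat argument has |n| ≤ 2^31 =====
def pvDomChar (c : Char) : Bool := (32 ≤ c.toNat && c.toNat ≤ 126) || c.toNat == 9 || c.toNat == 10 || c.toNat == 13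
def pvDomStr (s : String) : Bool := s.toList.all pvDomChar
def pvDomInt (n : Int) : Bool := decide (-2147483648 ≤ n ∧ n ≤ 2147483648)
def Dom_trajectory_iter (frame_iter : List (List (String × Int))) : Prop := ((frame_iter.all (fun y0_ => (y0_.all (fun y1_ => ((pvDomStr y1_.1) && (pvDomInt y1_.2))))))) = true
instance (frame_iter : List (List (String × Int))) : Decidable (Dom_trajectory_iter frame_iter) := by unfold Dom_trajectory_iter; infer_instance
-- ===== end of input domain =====

-- B builds the trajectory list back-to-front by a reverse traversal instead of A's
-- forward append-and-flush loop; same return value on every input where A returns.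

-- ===== PORT A =====
-- frame['dones'] truthiness; on a missing key Python raises KeyError (excluded by Pre_),
-- exact first-match lookup; where lookup = none this defaults to 0 (falsy) — such inputs are outside Pre_.
def pvDone (frame : List (String × Int)) : Bool :=
  (frame.lookup "dones").getD 0 != 0

def trajAuxA : List (List (String × Int)) → List (List (String × Int)) → List (List (List (String × Int)))
  | [], traj => if traj = [] then [] else [traj]
  | f :: rest, traj =>
    let traj' := traj ++ [f]
    if pvDone f then traj' :: trajAuxA rest [] else trajAuxA rest traj'

def trajectory_iter (frame_iter : List (List (String × Int))) : List (List (List (String × Int))) :=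
  trajAuxA frame_iter []

-- ===== PORT B =====
def altStep (frame : List (String × Int)) (groups : List (List (List (String × Int)))) : List (List (List (String × Int))) :=
  if pvDone frame then [frame] :: groups
  else match groups with
    | [] => [[frame]]
    | g :: gs => (frame :: g) :: gs

def trajectory_iter_alt (frame_iter : List (List (String × Int))) : List (List (List (String × Int))) :=
  frame_iter.foldr altStep []

-- ===== PRECONDITION & SPEC =====
-- Pre_ excludes exactly the inputs where A raises KeyError: a frame without a "dones" key.
def Pre_trajectory_iter (frame_iter : List (List (String × Int))) : Prop :=
  ∀ f ∈ frame_iter, (f.lookup "dones").isSome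
instance (frame_iter : List (List (String × Int))) : Decidable (Pre_trajectory_iter frame_iter) := by unfold Pre_trajectory_iter; infer_instance

def pvWitness_trajectory_iter : (List (List (String × Int))) := [[("dones", 1)], [("dones", 0)]]

def Spec_trajectory_iter (frame_iter : List (List (String × Int))) (out : List (List (List (String × Int)))) : Prop := out = trajectory_iter_alt frame_iter
instance (frame_iter : List (List (String × Int))) (out : List (List (List (String × Int)))) : Decidable (Spec_trajectory_iter frame_iter out) := by unfold Spec_trajectory_iter; infer_instance

-- ===== CLAIM (what is proved, stated in full; the proofs are below) =====
def Claim_equal_trajectory_iter : Prop := ∀ (frame_iter : List (List (String × Int))), Dom_trajectory_iter frame_iter → Pre_trajectory_iter frame_iter → Spec_trajectory_iter frame_iter (trajectory_iter frame_iter)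

-- ===== LEMMAS AND PROOFS =====

-- A's loop with pending prefix `traj` equals B's back-to-front result with `traj`
-- prepended to the first group (or [traj] alone when there are no groups).
theorem trajAuxA_eq_alt (frames : List (List (String × Int))) :
    ∀ traj, trajAuxA frames traj =
      match frames.foldr altStep [] with
      | [] => if traj = [] then [] else [traj]
      | g :: gs => (traj ++ g) :: gs := by
  induction frames with
  | nil => intro traj; simp [trajAuxA]
  | cons f rest ih =>
    intro traj
    simp only [trajAuxA, List.foldr, altStep]
    by_cases hd : pvDone f
    · simp only [hd, if_true]
      rw [ih []]
      cases h : rest.foldr altStep [] with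
      | nil => simp
      | cons g gs => simp
    · simp only [hd]
      rw [ih (traj ++ [f])]
      cases h : rest.foldr altStep [] with
      | nil => simp
      | cons g gs => simp

-- ===== VERDICT (by name: the statement is the Claim_ definition above) =====
theorem trajectory_iter_spec : Claim_equal_trajectory_iter := by
  intro frames _ _
  unfold Spec_trajectory_iter trajectory_iter trajectory_iter_alt
  rw [trajAuxA_eq_alt frames []]
  cases h : frames.foldr altStep [] <;> simp
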